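-- pv_equiv track=rewrite | github.com/MWARDUNI/Neuro-Nudge-Logic | nn_02_categorizer.py | categorize_assignments
-- ===== SOURCE A (Python) =====
-- def categorize_assignments(assignments):
--     categorized = {}
--
--     for assignment in assignments:
--         class_name = assignment['class']
--         assignment_type = assignment['type']
--
--         if class_name not in categorized:
--             categorized[class_name] = {}
--
--         if assignment_type not in categorized[class_name]:
--             categorized[class_name][assignment_type] = []
--
--         categorized[class_name][assignment_type].append(assignment)
--
--     return categorized
-- ===== SOURCE B (Python) =====
-- def categorize_assignments(assignments):
--     classes = list(dict.fromkeys(a['class'] for a in assignments))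
--     return {
--         c: {
--             t: [a for a in assignments if a['class'] == c and a['type'] == t]
--             for t in dict.fromkeys(a['type'] for a in assignments if a['class'] == c)
--         }
--         for c in classes
--     }
-- ===== Notes on version B (the rewrite author's own statement) =====
-- stated objective: alternative
-- what changed: Replaced A's single streaming pass that mutates a nested dict with membership checks by a declarative construction: dedup the class keys in first-occurrence order, then build the nested dict by comprehensions that filter the input per (class, type) group.
import Mathlib
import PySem

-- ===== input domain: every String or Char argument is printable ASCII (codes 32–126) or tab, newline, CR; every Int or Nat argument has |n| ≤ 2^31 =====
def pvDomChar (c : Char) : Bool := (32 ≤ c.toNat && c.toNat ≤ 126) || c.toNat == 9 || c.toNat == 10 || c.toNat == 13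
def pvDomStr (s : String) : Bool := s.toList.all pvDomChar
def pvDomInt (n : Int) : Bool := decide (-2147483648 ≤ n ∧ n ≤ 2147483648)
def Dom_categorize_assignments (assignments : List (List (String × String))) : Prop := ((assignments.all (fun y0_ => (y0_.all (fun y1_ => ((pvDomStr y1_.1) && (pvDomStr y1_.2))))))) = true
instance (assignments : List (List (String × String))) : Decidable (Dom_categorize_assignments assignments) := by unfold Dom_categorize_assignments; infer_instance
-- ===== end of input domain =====

-- B replaces A's streaming pass over a mutated nested dict by a declarative build:
-- dedup the class keys in first-occurrence order, then nested comprehensions that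
-- filter the input per (class, type) group (objective: alternative decomposition).

-- ===== PORT A =====
-- assignment['class'] / assignment['type']: first-match lookup in the assignment dict.
-- The "" default is unreachable under Pre_ (Python raises KeyError there).
def pvCls (a : List (String × String)) : String := (PySem.Dict.mk a).getD "class" ""
def pvTyp (a : List (String × String)) : String := (PySem.Dict.mk a).getD "type" ""

-- the body of A's for-loop, acting on the nested dict `categorized`
def pvStepA (categorized : PySem.Dict String (PySem.Dict String (List (List (String × String)))))
    (assignment : List (String × String)) :
    PySem.Dict String (PySem.Dict String (List (List (String × String)))) :=
  let class_name := pvCls assignment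
  let assignment_type := pvTyp assignment
  let categorized :=
    if categorized.contains class_name then categorized
    else categorized.insert class_name PySem.Dict.empty
  let inner := categorized.getD class_name PySem.Dict.empty
  let inner :=
    if inner.contains assignment_type then inner
    else inner.insert assignment_type []
  -- categorized[class_name][assignment_type].append(assignment)
  let inner := inner.modify assignment_type [] (fun l => l ++ [assignment])
  categorized.insert class_name inner

def categorize_assignments (assignments : List (List (String × String))) :
    List (String × List (String × List (List (String × String)))) :=
  ((assignments.foldl pvStepA PySem.Dict.empty).items.map (fun p => (p.1, p.2.items)))

-- ===== PORT B =====
def categorize_assignments_alt (assignments : List (List (String × String))) :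
    List (String × List (String × List (List (String × String)))) :=
  (PySem.List.dedup (assignments.map pvCls)).map (fun c =>
    (c, (PySem.List.dedup ((assignments.filter (fun a => pvCls a == c)).map pvTyp)).map (fun t =>
      (t, assignments.filter (fun a => pvCls a == c && pvTyp a == t)))))

-- ===== PRECONDITION & SPEC =====
-- Pre_: every assignment has both a 'class' and a 'type' key; on any other input
-- Python A raises KeyError (it returns on exactly these inputs).
def Pre_categorize_assignments (assignments : List (List (String × String))) : Prop :=
  ∀ a ∈ assignments, ((PySem.Dict.mk a).get? "class").isSome ∧ ((PySem.Dict.mk a).get? "type").isSome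

instance (assignments : List (List (String × String))) : Decidable (Pre_categorize_assignments assignments) := by
  unfold Pre_categorize_assignments; infer_instance

def pvWitness_categorize_assignments : (List (List (String × String))) :=
  [[("class", "math"), ("type", "hw")], [("class", "math"), ("type", "quiz")]]

def Spec_categorize_assignments (assignments : List (List (String × String)))
    (out : List (String × List (String × List (List (String × String))))) : Prop :=
  out = categorize_assignments_alt assignments

-- instance search does not reach this nesting depth by itself; the same core
-- instances, assembled by hand (computable)
def pvDecEq1 : DecidableEq (String × List (List (String × String))) := by infer_instance
def pvDecEq2 : DecidableEq (List (String × List (List (String × String)))) :=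
  @instDecidableEqList _ pvDecEq1
def pvDecEq3 : DecidableEq (String × List (String × List (List (String × String)))) :=
  @instDecidableEqProd _ _ inferInstance pvDecEq2
def pvDecEq : DecidableEq (List (String × List (String × List (List (String × String))))) :=
  @instDecidableEqList _ pvDecEq3

instance (assignments : List (List (String × String))) (out : List (String × List (String × List (List (String × String))))) : Decidable (Spec_categorize_assignments assignments out) := by
  unfold Spec_categorize_assignments; exact pvDecEq _ _

-- ===== CLAIM (what is proved, stated in full; the proofs are below) =====
def Claim_equal_categorize_assignments : Prop := ∀ (assignments : List (List (String × String))), Dom_categorize_assignments assignments → Pre_categorize_assignments assignments → Spec_categorize_assignments assignments (categorize_assignments assignments)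

-- ===== LEMMAS AND PROOFS =====

-- the invariant shape of A's loop state, written with B's building blocks
def pvInner (xs : List (List (String × String))) (c : String) :
    PySem.Dict String (List (List (String × String))) :=
  PySem.Dict.mk ((PySem.List.dedup ((xs.filter (fun a => pvCls a == c)).map pvTyp)).map (fun t =>
    (t, xs.filter (fun a => pvCls a == c && pvTyp a == t))))

def pvOuter (xs : List (List (String × String))) :
    PySem.Dict String (PySem.Dict String (List (List (String × String)))) :=
  PySem.Dict.mk ((PySem.List.dedup (xs.map pvCls)).map (fun c => (c, pvInner xs c)))

theorem pv_dedup_snoc {α : Type} [BEq α] [LawfulBEq α] (l : List α) (x : α) :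
    PySem.List.dedup (l ++ [x]) =
      if x ∈ l then PySem.List.dedup l else PySem.List.dedup l ++ [x] := by
  have h : PySem.List.dedup (l ++ [x]) = PySem.Set.add (PySem.List.dedup l) x := by
    simp [PySem.List.dedup, PySem.Set.ofList, List.foldl_append]
  rw [h]
  unfold PySem.Set.add
  have hc : PySem.Set.contains (PySem.List.dedup l) x = decide (x ∈ l) := by
    simp [PySem.Set.contains]
  rw [hc]
  by_cases hx : x ∈ l <;> simp [hx]

theorem pvOuter_keys (xs : List (List (String × String))) :
    (pvOuter xs).keys = PySem.List.dedup (xs.map pvCls) := by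
  simp [pvOuter, PySem.Dict.keys, List.map_map, Function.comp_def]

theorem pvInner_keys (xs : List (List (String × String))) (c : String) :
    (pvInner xs c).keys = PySem.List.dedup ((xs.filter (fun a => pvCls a == c)).map pvTyp) := by
  simp [pvInner, PySem.Dict.keys, List.map_map, Function.comp_def]

theorem pvOuter_contains (xs : List (List (String × String))) (c : String) :
    (pvOuter xs).contains c = decide (c ∈ xs.map pvCls) := by
  rw [PySem.Dict.contains_eq_decide_mem_keys, pvOuter_keys]
  simp

theorem pvInner_contains (xs : List (List (String × String))) (c t : String) :
    (pvInner xs c).contains t = decide (t ∈ (xs.filter (fun a => pvCls a == c)).map pvTyp) := by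
  rw [PySem.Dict.contains_eq_decide_mem_keys, pvInner_keys]
  simp

theorem pvOuter_nodup_keys (xs : List (List (String × String))) : (pvOuter xs).keys.Nodup := by
  rw [pvOuter_keys]; exact PySem.List.nodup_dedup _

theorem pvInner_nodup_keys (xs : List (List (String × String))) (c : String) :
    (pvInner xs c).keys.Nodup := by
  rw [pvInner_keys]; exact PySem.List.nodup_dedup _

theorem pvOuter_getD (xs : List (List (String × String))) (c : String)
    (hc : c ∈ xs.map pvCls) (d : PySem.Dict String (List (List (String × String)))) :
    (pvOuter xs).getD c d = pvInner xs c := by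
  refine PySem.Dict.getD_of_mem_items _ ?_ (pvOuter_nodup_keys xs) d
  exact List.mem_map_of_mem ((PySem.List.mem_dedup _ _).2 hc)

theorem pvInner_getD (xs : List (List (String × String))) (c t : String)
    (ht : t ∈ (xs.filter (fun a => pvCls a == c)).map pvTyp) (d : List (List (String × String))) :
    (pvInner xs c).getD t d = xs.filter (fun a => pvCls a == c && pvTyp a == t) := by
  refine PySem.Dict.getD_of_mem_items _ ?_ (pvInner_nodup_keys xs c) d
  exact List.mem_map_of_mem ((PySem.List.mem_dedup _ _).2 ht)

-- filters over xs ++ [a]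
theorem pvFilterC_snoc_ne (xs : List (List (String × String))) (a : List (String × String))
    (c : String) (h : ¬ pvCls a = c) :
    (xs ++ [a]).filter (fun x => pvCls x == c) = xs.filter (fun x => pvCls x == c) := by
  simp [List.filter_append, h]

theorem pvFilterCT_snoc_ne_c (xs : List (List (String × String))) (a : List (String × String))
    (c t : String) (h : ¬ pvCls a = c) :
    (xs ++ [a]).filter (fun x => pvCls x == c && pvTyp x == t)
      = xs.filter (fun x => pvCls x == c && pvTyp x == t) := by
  simp [List.filter_append, h]

theorem pvFilterCT_snoc_ne_t (xs : List (List (String × String))) (a : List (String × String))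
    (t : String) (h : ¬ t = pvTyp a) :
    (xs ++ [a]).filter (fun x => pvCls x == pvCls a && pvTyp x == t)
      = xs.filter (fun x => pvCls x == pvCls a && pvTyp x == t) := by
  have h2 : ¬ pvTyp a = t := fun h' => h h'.symm
  simp [List.filter_append, h2]

theorem pvInner_snoc_ne (xs : List (List (String × String))) (a : List (String × String))
    (c : String) (h : ¬ pvCls a = c) : pvInner (xs ++ [a]) c = pvInner xs c := by
  apply PySem.Dict.ext
  simp only [pvInner, pvFilterC_snoc_ne xs a c h]
  exact List.map_congr_left (fun t _ => by rw [pvFilterCT_snoc_ne_c xs a c t h])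

theorem pvFilterCT_nil_of_not_memT (xs : List (List (String × String))) (c t : String)
    (ht : t ∉ (xs.filter (fun x => pvCls x == c)).map pvTyp) :
    xs.filter (fun x => pvCls x == c && pvTyp x == t) = [] := by
  rw [List.filter_eq_nil_iff]
  intro x hx hmatch
  rw [Bool.and_eq_true, beq_iff_eq, beq_iff_eq] at hmatch
  apply ht
  rw [← hmatch.2]
  exact List.mem_map_of_mem (List.mem_filter.2 ⟨hx, by simp [hmatch.1]⟩)

theorem pvFilterC_nil_of_not_memC (xs : List (List (String × String))) (c : String)
    (hc : c ∉ xs.map pvCls) : xs.filter (fun x => pvCls x == c) = [] := by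
  rw [List.filter_eq_nil_iff]
  intro x hx hmatch
  rw [beq_iff_eq] at hmatch
  apply hc
  rw [← hmatch]
  exact List.mem_map_of_mem hx

-- the heart: A's loop body advances the closed-form state by one element
theorem pvStep_outer (xs : List (List (String × String))) (a : List (String × String)) :
    pvStepA (pvOuter xs) a = pvOuter (xs ++ [a]) := by
  have hmapsnoc : (xs ++ [a]).map pvCls = xs.map pvCls ++ [pvCls a] := by simp
  by_cases hc : pvCls a ∈ xs.map pvCls
  · have h1 : (pvOuter xs).contains (pvCls a) = true := by
      rw [pvOuter_contains]; simpa using hc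
    have hdc : PySem.List.dedup ((xs ++ [a]).map pvCls) = PySem.List.dedup (xs.map pvCls) := by
      rw [hmapsnoc, pv_dedup_snoc, if_pos hc]
    have hfc : (xs ++ [a]).filter (fun x => pvCls x == pvCls a)
        = xs.filter (fun x => pvCls x == pvCls a) ++ [a] := by
      simp [List.filter_append]
    by_cases ht : pvTyp a ∈ (xs.filter (fun x => pvCls x == pvCls a)).map pvTyp
    · -- class and type both seen before: in-place update at (class, type)
      have h2 : (pvInner xs (pvCls a)).contains (pvTyp a) = true := by
        rw [pvInner_contains]; simpa using ht
      have hdt : PySem.List.dedup (((xs ++ [a]).filter (fun x => pvCls x == pvCls a)).map pvTyp)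
          = PySem.List.dedup ((xs.filter (fun x => pvCls x == pvCls a)).map pvTyp) := by
        rw [hfc, List.map_append, List.map_cons, List.map_nil, pv_dedup_snoc, if_pos ht]
      have hinner : pvInner (xs ++ [a]) (pvCls a)
          = (pvInner xs (pvCls a)).insert (pvTyp a)
              (xs.filter (fun x => pvCls x == pvCls a && pvTyp x == pvTyp a) ++ [a]) := by
        apply PySem.Dict.ext
        rw [PySem.Dict.items_insert_of_contains _ _ h2]
        simp only [pvInner, hdt]
        rw [List.map_map]
        refine List.map_congr_left (fun t htm => ?_)
        by_cases htt : t = pvTyp a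
        · subst htt
          simp only [Function.comp_apply, beq_self_eq_true, if_true]
          refine Prod.ext rfl ?_
          simp [List.filter_append]
        · have hne : (t == pvTyp a) = false := by simpa using htt
          simp only [Function.comp_apply, hne, Bool.false_eq_true, if_false]
          exact Prod.ext rfl (pvFilterCT_snoc_ne_t xs a t htt)
      simp only [pvStepA, h1, if_true, pvOuter_getD xs _ hc, h2, PySem.Dict.modify,
        pvInner_getD xs _ _ ht]
      apply PySem.Dict.ext
      rw [PySem.Dict.items_insert_of_contains _ _ h1]
      show _ = (pvOuter (xs ++ [a])).items
      simp only [pvOuter, hdc]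
      rw [List.map_map]
      refine List.map_congr_left (fun c hcm => ?_)
      by_cases hcc : c = pvCls a
      · subst hcc
        simp only [Function.comp_apply, beq_self_eq_true, if_true]
        exact Prod.ext rfl hinner.symm
      · have hne : (c == pvCls a) = false := by simpa using hcc
        simp only [Function.comp_apply, hne, Bool.false_eq_true, if_false]
        exact Prod.ext rfl (pvInner_snoc_ne xs a c (fun h => hcc h.symm)).symm
    · -- class seen, type new in this class: a fresh (type, [a]) entry is appended
      have h2 : (pvInner xs (pvCls a)).contains (pvTyp a) = false := by
        rw [pvInner_contains]; simpa using ht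
      have hdt : PySem.List.dedup (((xs ++ [a]).filter (fun x => pvCls x == pvCls a)).map pvTyp)
          = PySem.List.dedup ((xs.filter (fun x => pvCls x == pvCls a)).map pvTyp) ++ [pvTyp a] := by
        rw [hfc, List.map_append, List.map_cons, List.map_nil, pv_dedup_snoc, if_neg ht]
      have hnil : xs.filter (fun x => pvCls x == pvCls a && pvTyp x == pvTyp a) = [] :=
        pvFilterCT_nil_of_not_memT xs (pvCls a) (pvTyp a) ht
      have hinner : pvInner (xs ++ [a]) (pvCls a)
          = (pvInner xs (pvCls a)).insert (pvTyp a) [a] := by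
        apply PySem.Dict.ext
        rw [PySem.Dict.items_insert_of_not_contains _ _ h2]
        simp only [pvInner, hdt, List.map_append, List.map_cons, List.map_nil]
        congr 1
        · refine List.map_congr_left (fun t htm => ?_)
          have httne : ¬ t = pvTyp a := fun h => ht (h ▸ (PySem.List.mem_dedup _ _).1 htm)
          exact Prod.ext rfl (pvFilterCT_snoc_ne_t xs a t httne)
        · simp [List.filter_append, hnil]
      simp only [pvStepA, h1, if_true, pvOuter_getD xs _ hc, h2, Bool.false_eq_true, if_false,
        PySem.Dict.modify, PySem.Dict.getD_insert_self, List.nil_append,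
        PySem.Dict.insert_insert_self]
      apply PySem.Dict.ext
      rw [PySem.Dict.items_insert_of_contains _ _ h1]
      show _ = (pvOuter (xs ++ [a])).items
      simp only [pvOuter, hdc]
      rw [List.map_map]
      refine List.map_congr_left (fun c hcm => ?_)
      by_cases hcc : c = pvCls a
      · subst hcc
        simp only [Function.comp_apply, beq_self_eq_true, if_true]
        exact Prod.ext rfl hinner.symm
      · have hne : (c == pvCls a) = false := by simpa using hcc
        simp only [Function.comp_apply, hne, Bool.false_eq_true, if_false]
        exact Prod.ext rfl (pvInner_snoc_ne xs a c (fun h => hcc h.symm)).symm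
  · -- a brand-new class: a fresh (class, {type: [a]}) entry is appended
    have h1 : (pvOuter xs).contains (pvCls a) = false := by
      rw [pvOuter_contains]; simpa using hc
    have hdc : PySem.List.dedup (xs.map pvCls ++ [pvCls a])
        = PySem.List.dedup (xs.map pvCls) ++ [pvCls a] := by
      rw [pv_dedup_snoc, if_neg hc]
    have hfcnil : xs.filter (fun x => pvCls x == pvCls a) = [] :=
      pvFilterC_nil_of_not_memC xs (pvCls a) hc
    have hfctnil : xs.filter (fun x => pvCls x == pvCls a && pvTyp x == pvTyp a) = [] := by
      rw [List.filter_eq_nil_iff]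
      intro x hx hmatch
      rw [Bool.and_eq_true, beq_iff_eq] at hmatch
      apply hc
      rw [← hmatch.1]
      exact List.mem_map_of_mem hx
    have hinner : pvInner (xs ++ [a]) (pvCls a) = PySem.Dict.empty.insert (pvTyp a) [a] := by
      apply PySem.Dict.ext
      have hone : (xs ++ [a]).filter (fun x => pvCls x == pvCls a) = [a] := by
        simp [List.filter_append, hfcnil]
      simp only [pvInner, hone, List.map_cons, List.map_nil]
      rw [show PySem.List.dedup [pvTyp a] = [pvTyp a] from rfl]
      rw [PySem.Dict.items_insert_of_not_contains _ _ (PySem.Dict.contains_empty _)]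
      simp [List.filter_append, hfctnil, PySem.Dict.empty]
    simp only [pvStepA, h1, Bool.false_eq_true, if_false, PySem.Dict.getD_insert_self,
      PySem.Dict.contains_empty, PySem.Dict.modify, List.nil_append,
      PySem.Dict.insert_insert_self]
    apply PySem.Dict.ext
    rw [PySem.Dict.items_insert_of_not_contains _ _ h1]
    show _ = (pvOuter (xs ++ [a])).items
    simp only [pvOuter, List.map_append, List.map_cons, List.map_nil, hdc]
    congr 1
    · refine List.map_congr_left (fun c hcm => ?_)
      have hcne : ¬ pvCls a = c := fun h => hc (h ▸ (PySem.List.mem_dedup _ _).1 hcm)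
      exact Prod.ext rfl (pvInner_snoc_ne xs a c hcne).symm
    · exact congrArg (fun d => [(pvCls a, d)]) hinner.symm

theorem pvFold_eq (xs : List (List (String × String))) :
    xs.foldl pvStepA PySem.Dict.empty = pvOuter xs := by
  induction xs using List.reverseRecOn with
  | nil =>
      apply PySem.Dict.ext
      simp [pvOuter, PySem.List.dedup, PySem.Set.ofList, PySem.Dict.empty]
  | append_singleton ys a ih =>
      rw [List.foldl_append, List.foldl_cons, List.foldl_nil, ih, pvStep_outer]

-- ===== VERDICT (by name: the statement is the Claim_ definition above) =====
theorem categorize_assignments_spec : Claim_equal_categorize_assignments := by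
  intro assignments _ _
  unfold Spec_categorize_assignments categorize_assignments categorize_assignments_alt
  rw [pvFold_eq]
  simp [pvOuter, pvInner, List.map_map, Function.comp]
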